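-- pv_equiv track=rewrite | github.com/pukkapies/geninterp | geninterp/factors.py | prod_div_rem
-- ===== SOURCE A (Python) =====
-- def prod_div_rem(alist, divisor):
--     """
--     Calculates the remainder from dividing the product of elements in alist with divisor
--     The method used does not actually multiply out the elements of alist - the function is intended
--     to be used for situations where the product is very large
--     :param alist: a list of nonnegative integers
--     :param divisor: an integer
--     :return: the remainder
--     """
--     assert isinstance(alist, list)
--     for element in alist:
--         assert element >= 0
--     if len(alist) == 0:
--         return 0
--     elif len(alist) == 1:
--         return alist[0] % divisor
--     else:
--         answer = 0
--         remainder1 = alist[0] % divisor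
--         for i in range(1, len(alist)):
--             remainder2 = alist[i] % divisor
--             answer = (remainder1 * remainder2) % divisor
--             remainder1 = answer
--     return answer
-- ===== SOURCE B (Python) =====
-- def prod_div_rem(alist, divisor):
--     """Simpler: take the full product once, then a single final mod."""
--     assert isinstance(alist, list)
--     for element in alist:
--         assert element >= 0
--     if not alist:
--         return 0
--     product = 1
--     for element in alist:
--         product *= element
--     return product % divisor
-- ===== Notes on version B (the rewrite author's own statement) =====
-- stated objective: simpler
-- what changed: Replaces the stepwise modular-reduction loop (remainder carried through every element) with a single math.prod of the list followed by one final mod.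
import Mathlib
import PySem

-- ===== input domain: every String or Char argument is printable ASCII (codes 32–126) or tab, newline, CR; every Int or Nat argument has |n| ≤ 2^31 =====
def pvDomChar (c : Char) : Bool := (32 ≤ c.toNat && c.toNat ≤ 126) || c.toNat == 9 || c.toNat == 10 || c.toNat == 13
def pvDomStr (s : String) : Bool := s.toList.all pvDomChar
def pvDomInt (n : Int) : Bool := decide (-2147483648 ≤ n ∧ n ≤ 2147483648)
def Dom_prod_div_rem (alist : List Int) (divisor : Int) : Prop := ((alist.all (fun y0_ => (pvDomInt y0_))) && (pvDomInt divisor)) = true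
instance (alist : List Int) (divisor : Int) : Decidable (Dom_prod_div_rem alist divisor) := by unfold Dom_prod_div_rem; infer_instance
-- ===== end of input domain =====

-- B computes the full product of the list and takes one final mod, replacing A's stepwise modular loop; objective: simpler.


-- ===== PORT A =====
def prod_div_rem (alist : List Int) (divisor : Int) : Int :=
  if PySem.List.len alist = 0 then 0
  else if PySem.List.len alist = 1 then
    PySem.Int.mod (PySem.List.pyGetD alist 0 0) divisor
  else
    -- answer/remainder1 loop: remainder1 carries the running answer
    (PySem.List.pyRange 1 (PySem.List.len alist)).foldl
      (fun remainder1 i =>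
        PySem.Int.mod (remainder1 * PySem.Int.mod (PySem.List.pyGetD alist i 0) divisor) divisor)
      (PySem.Int.mod (PySem.List.pyGetD alist 0 0) divisor)

-- ===== PORT B =====
def prod_div_rem_alt (alist : List Int) (divisor : Int) : Int :=
  if alist = [] then 0
  else PySem.Int.mod (alist.foldl (fun product element => product * element) 1) divisor

-- ===== PRECONDITION & SPEC =====
-- Pre_ excludes exactly the inputs on which A raises: a negative element (AssertionError)
-- and a nonempty list with divisor 0 (ZeroDivisionError).
def Pre_prod_div_rem (alist : List Int) (divisor : Int) : Prop :=
  (∀ x ∈ alist, 0 ≤ x) ∧ (alist = [] ∨ divisor ≠ 0)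
instance (alist : List Int) (divisor : Int) : Decidable (Pre_prod_div_rem alist divisor) := by
  unfold Pre_prod_div_rem; infer_instance
def pvWitness_prod_div_rem : List Int × Int := ([2, 3, 4], 5)

def Spec_prod_div_rem (alist : List Int) (divisor : Int) (out : Int) : Prop := out = prod_div_rem_alt alist divisor
instance (alist : List Int) (divisor : Int) (out : Int) : Decidable (Spec_prod_div_rem alist divisor out) := by unfold Spec_prod_div_rem; infer_instance

-- ===== CLAIM (what is proved, stated in full; the proofs are below) =====
def Claim_equal_prod_div_rem : Prop := ∀ (alist : List Int) (divisor : Int), Dom_prod_div_rem alist divisor → Pre_prod_div_rem alist divisor → Spec_prod_div_rem alist divisor (prod_div_rem alist divisor)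

-- ===== LEMMAS AND PROOFS =====

theorem fmod_emod (a b : Int) : (a.fmod b) % b = a % b := by
  rw [Int.fmod_eq_emod]; split
  · simp
  · simp [Int.add_emod_right]

theorem fmod_congr {a c : Int} (d : Int) (h : a % d = c % d) : a.fmod d = c.fmod d := by
  have hd : (d ∣ a) ↔ (d ∣ c) := by
    rw [Int.dvd_iff_emod_eq_zero, Int.dvd_iff_emod_eq_zero, h]
  rw [Int.fmod_eq_emod, Int.fmod_eq_emod, h]
  by_cases h0 : 0 ≤ d <;> simp [h0, hd]

theorem mod_mul_key (a x d : Int) :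
    PySem.Int.mod (PySem.Int.mod a d * PySem.Int.mod x d) d = PySem.Int.mod (a * x) d := by
  show Int.fmod _ _ = Int.fmod _ _
  apply fmod_congr
  conv_rhs => rw [Int.mul_emod]
  rw [Int.mul_emod]
  show (Int.fmod a d % d * (Int.fmod x d % d)) % d = _
  rw [fmod_emod, fmod_emod]

-- A's loop with running remainder equals one mod of the running product.
theorem fold_key (d : Int) (l : List Int) : ∀ (a : Int),
    l.foldl (fun r x => PySem.Int.mod (r * PySem.Int.mod x d) d) (PySem.Int.mod a d)
      = PySem.Int.mod (l.foldl (fun p x => p * x) a) d := by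
  induction l with
  | nil => intro a; rfl
  | cons x t ih =>
      intro a
      simp only [List.foldl_cons]
      rw [mod_mul_key, ih]

-- the indices 1..len-1 of x::t pick out exactly t
theorem map_tail_idx (x : Int) (t : List Int) :
    (PySem.List.pyRange 1 (PySem.List.len (x :: t))).map
      (fun i => PySem.List.pyGetD (x :: t) i 0) = t := by
  have h0 : PySem.List.pyRange 0 (PySem.List.len (x :: t))
      = 0 :: PySem.List.pyRange 1 (PySem.List.len (x :: t)) := by
    rw [PySem.List.pyRange_one_cons (by simp [PySem.List.len])]; norm_num
  have hm := PySem.List.map_pyGetD_pyRange_zero (x :: t) 0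
  rw [h0] at hm
  simpa using hm

-- ===== VERDICT (by name: the statement is the Claim_ definition above) =====
theorem prod_div_rem_spec : Claim_equal_prod_div_rem := by
  intro alist divisor _ hpre
  unfold Spec_prod_div_rem prod_div_rem prod_div_rem_alt
  match alist with
  | [] => rfl
  | [x] => simp [PySem.List.len, PySem.List.pyGetD]
  | x :: y :: t =>
      have hlen0 : PySem.List.len (x :: y :: t) ≠ 0 := by simp [PySem.List.len]; omega
      have hlen1 : PySem.List.len (x :: y :: t) ≠ 1 := by simp [PySem.List.len]; omega
      simp only [hlen0, hlen1, if_false, List.cons_ne_nil]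
      have hmap := map_tail_idx x (y :: t)
      calc (PySem.List.pyRange 1 (PySem.List.len (x :: y :: t))).foldl
            (fun remainder1 i =>
              PySem.Int.mod (remainder1 * PySem.Int.mod (PySem.List.pyGetD (x :: y :: t) i 0) divisor) divisor)
            (PySem.Int.mod (PySem.List.pyGetD (x :: y :: t) 0 0) divisor)
          = ((PySem.List.pyRange 1 (PySem.List.len (x :: y :: t))).map
              (fun i => PySem.List.pyGetD (x :: y :: t) i 0)).foldl
              (fun r v => PySem.Int.mod (r * PySem.Int.mod v divisor) divisor)
              (PySem.Int.mod x divisor) := by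
            rw [List.foldl_map]
            simp [PySem.List.pyGetD_ofNat']
        _ = PySem.Int.mod ((y :: t).foldl (fun p v => p * v) x) divisor := by
            rw [hmap, fold_key]
        _ = PySem.Int.mod ((x :: y :: t).foldl (fun product element => product * element) 1) divisor := by
            simp
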